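-- pv_equiv track=rewrite | github.com/seraphina289/axiom | editor/syntax.py | _highlight_character_at_position
-- ===== SOURCE A (Python) =====
-- from typing import List, Tuple, Optional, Dict
--
-- def _highlight_character_at_position(segments: List[Tuple[str, int]],
--                                    pos: int, color: int) -> List[Tuple[str, int]]:
--     """Highlight a single character at a specific position"""
--     new_segments = []
--     current_pos = 0
--
--     for text, segment_color in segments:
--         if current_pos + len(text) <= pos:
--             # Before target position
--             new_segments.append((text, segment_color))
--             current_pos += len(text)
--         elif current_pos > pos:
--             # After target position
--             new_segments.append((text, segment_color))
--         else:
--             # Contains target position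
--             local_pos = pos - current_pos
--             if local_pos == 0:
--                 # At start of segment
--                 new_segments.append((text[0], color))
--                 if len(text) > 1:
--                     new_segments.append((text[1:], segment_color))
--             elif local_pos == len(text) - 1:
--                 # At end of segment
--                 if len(text) > 1:
--                     new_segments.append((text[:-1], segment_color))
--                 new_segments.append((text[-1], color))
--             else:
--                 # In middle of segment
--                 new_segments.append((text[:local_pos], segment_color))
--                 new_segments.append((text[local_pos], color))
--                 new_segments.append((text[local_pos + 1:], segment_color))
--             current_pos += len(text)
--
--     return new_segments
-- ===== SOURCE B (Python) =====
-- from typing import List, Tuple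
--
-- def _highlight_character_at_position(segments: List[Tuple[str, int]],
--                                      pos: int, color: int) -> List[Tuple[str, int]]:
--     """Highlight a single character at a specific position"""
--     ends = []
--     total = 0
--     for text, _ in segments:
--         total += len(text)
--         ends.append(total)
--     if pos < 0 or pos >= total:
--         return list(segments)
--     lo, hi = 0, len(ends)
--     while lo < hi:
--         mid = (lo + hi) // 2
--         if ends[mid] <= pos:
--             lo = mid + 1
--         else:
--             hi = mid
--     text, col = segments[lo]
--     off = pos - (ends[lo] - len(text))
--     pieces = [(text[:off], col), (text[off], color), (text[off + 1:], col)]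
--     return segments[:lo] + [p for p in pieces if p[0]] + segments[lo + 1:]
-- ===== Notes on version B (the rewrite author's own statement) =====
-- stated objective: alternative
-- what changed: Replaces A's single rebuild loop with its before/after/start/end/middle branch cases by a staged algorithm: one pass builds a prefix-sum ends array, a binary search over it locates the segment containing pos, and the result is spliced as segments[:i] + filtered three slice pieces + segments[i+1:].
import Mathlib
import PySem

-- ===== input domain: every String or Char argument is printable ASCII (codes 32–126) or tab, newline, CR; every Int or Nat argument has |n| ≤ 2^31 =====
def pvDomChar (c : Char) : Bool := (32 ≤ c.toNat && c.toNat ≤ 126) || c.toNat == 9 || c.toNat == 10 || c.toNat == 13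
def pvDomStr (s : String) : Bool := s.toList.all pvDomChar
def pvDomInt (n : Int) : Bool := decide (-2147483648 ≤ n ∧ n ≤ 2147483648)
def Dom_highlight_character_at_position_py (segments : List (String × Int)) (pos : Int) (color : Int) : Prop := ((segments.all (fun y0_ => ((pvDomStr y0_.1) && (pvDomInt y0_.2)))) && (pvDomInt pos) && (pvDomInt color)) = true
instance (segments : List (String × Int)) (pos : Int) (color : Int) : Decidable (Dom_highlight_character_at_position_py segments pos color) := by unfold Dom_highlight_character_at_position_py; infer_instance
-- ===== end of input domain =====

-- B replaces A's single rebuild loop (with before/after/start/end/middle cases) by staged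
-- passes: prefix-sum ends array, binary search for the containing segment, then a splice;
-- objective: alternative (same overall cost).

-- ===== PORT A =====
-- Port of A: foldl over segments with state (new_segments, current_pos), branches in A's order.
-- In the "contains target" branch 0 ≤ local_pos < len(text), so the pyGet? there is always
-- some; '.getD ' '' only discharges the Option (Python raises outside that range, never here).
def highlight_character_at_position_py (segments : List (String × Int)) (pos : Int) (color : Int) : List (String × Int) :=
  (segments.foldl (fun (st : List (String × Int) × Int) seg =>
    let new_segments := st.1
    let current_pos := st.2
    let text := seg.1
    let segment_color := seg.2
    let n := PySem.Str.len text
    if current_pos + n ≤ pos then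
      (new_segments ++ [(text, segment_color)], current_pos + n)
    else if current_pos > pos then
      (new_segments ++ [(text, segment_color)], current_pos)
    else
      let local_pos := pos - current_pos
      if local_pos = 0 then
        (new_segments ++ [(String.ofList [(PySem.Str.pyGet? text 0).getD ' '], color)] ++
          (if n > 1 then [(PySem.Str.slice text (some 1) none, segment_color)] else []),
         current_pos + n)
      else if local_pos = n - 1 then
        (new_segments ++ (if n > 1 then [(PySem.Str.slice text none (some (-1)), segment_color)] else []) ++
          [(String.ofList [(PySem.Str.pyGet? text (-1)).getD ' '], color)],
         current_pos + n)
      else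
        (new_segments ++ [(PySem.Str.slice text none (some local_pos), segment_color),
                          (String.ofList [(PySem.Str.pyGet? text local_pos).getD ' '], color),
                          (PySem.Str.slice text (some (local_pos + 1)) none, segment_color)],
         current_pos + n)) ([], 0)).1

-- ===== PORT B =====
-- Source B's while-loop binary search: least index in [lo, hi) whose end exceeds pos.
-- ends[mid] is indexed with getD 0: mid < hi ≤ len(ends) at every call, so always in range.
def hcapBisect (ends : List Int) (pos : Int) (lo hi : Nat) : Nat :=
  if _h : lo < hi then
    if ends.getD ((lo + hi) / 2) 0 ≤ pos then hcapBisect ends pos ((lo + hi) / 2 + 1) hi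
    else hcapBisect ends pos lo ((lo + hi) / 2)
  else lo
termination_by hi - lo
decreasing_by all_goals omega

-- Port of B (Source B): build the prefix-sum ends array, early unchanged return, binary-search the
-- containing segment, splice filtered slice pieces. segments[lo] and ends[lo] are indexed with
-- getD: lo is in range whenever this branch is reached (proved below), as in Python.
def highlight_character_at_position_py_alt (segments : List (String × Int)) (pos : Int) (color : Int) : List (String × Int) :=
  let st := segments.foldl (fun (st : List Int × Int) seg =>
      let total := st.2 + PySem.Str.len seg.1
      (st.1 ++ [total], total)) ([], 0)
  let ends := st.1
  let total := st.2
  if pos < 0 ∨ pos ≥ total then segments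
  else
    let lo := hcapBisect ends pos 0 ends.length
    let tc := segments.getD lo ("", 0)
    let text := tc.1
    let col := tc.2
    let off := pos - (ends.getD lo 0 - PySem.Str.len text)
    let pieces := [(PySem.Str.slice text none (some off), col),
                   (String.ofList [(PySem.Str.pyGet? text off).getD ' '], color),
                   (PySem.Str.slice text (some (off + 1)) none, col)].filter (fun p => p.1 ≠ "")
    segments.take lo ++ pieces ++ segments.drop (lo + 1)

-- ===== PRECONDITION & SPEC =====
def Spec_highlight_character_at_position_py (segments : List (String × Int)) (pos : Int) (color : Int) (out : List (String × Int)) : Prop := out = highlight_character_at_position_py_alt segments pos color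
instance (segments : List (String × Int)) (pos : Int) (color : Int) (out : List (String × Int)) : Decidable (Spec_highlight_character_at_position_py segments pos color out) := by unfold Spec_highlight_character_at_position_py; infer_instance

-- ===== CLAIM (what is proved, stated in full; the proofs are below) =====
def Claim_equal_highlight_character_at_position_py : Prop := ∀ (segments : List (String × Int)) (pos : Int) (color : Int), Dom_highlight_character_at_position_py segments pos color → Spec_highlight_character_at_position_py segments pos color (highlight_character_at_position_py segments pos color)

-- ===== LEMMAS AND PROOFS =====

-- A's loop body, named so the fold can be reasoned about with a generalized initial state.
def hcapStepA (pos color : Int) (st : List (String × Int) × Int) (seg : String × Int) : List (String × Int) × Int :=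
  let new_segments := st.1
  let current_pos := st.2
  let text := seg.1
  let segment_color := seg.2
  let n := PySem.Str.len text
  if current_pos + n ≤ pos then
    (new_segments ++ [(text, segment_color)], current_pos + n)
  else if current_pos > pos then
    (new_segments ++ [(text, segment_color)], current_pos)
  else
    let local_pos := pos - current_pos
    if local_pos = 0 then
      (new_segments ++ [(String.ofList [(PySem.Str.pyGet? text 0).getD ' '], color)] ++
        (if n > 1 then [(PySem.Str.slice text (some 1) none, segment_color)] else []),
       current_pos + n)
    else if local_pos = n - 1 then
      (new_segments ++ (if n > 1 then [(PySem.Str.slice text none (some (-1)), segment_color)] else []) ++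
        [(String.ofList [(PySem.Str.pyGet? text (-1)).getD ' '], color)],
       current_pos + n)
    else
      (new_segments ++ [(PySem.Str.slice text none (some local_pos), segment_color),
                        (String.ofList [(PySem.Str.pyGet? text local_pos).getD ' '], color),
                        (PySem.Str.slice text (some (local_pos + 1)) none, segment_color)],
       current_pos + n)

theorem hcapA_eq_fold (segments : List (String × Int)) (pos color : Int) :
    highlight_character_at_position_py segments pos color
      = (segments.foldl (hcapStepA pos color) ([], 0)).1 := rfl

-- reference locate-scan: intermediate between A's fold and B's bisect-splice (proof-only)
def hcapGo (pos color : Int) (segs : List (String × Int)) (current : Int) : List (String × Int) :=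
  match segs with
  | [] => []
  | (text, col) :: rest =>
    let n := PySem.Str.len text
    if current ≤ pos ∧ pos < current + n then
      let off := pos - current
      let pieces := [(PySem.Str.slice text none (some off), col),
                     (String.ofList [(PySem.Str.pyGet? text off).getD ' '], color),
                     (PySem.Str.slice text (some (off + 1)) none, col)].filter (fun p => p.1 ≠ "")
      pieces ++ rest
    else (text, col) :: hcapGo pos color rest (current + n)

theorem hcapLen_nonneg (t : String) : 0 ≤ PySem.Str.len t := by
  simp [PySem.Str.len_eq]

-- once current_pos has passed pos, A copies the rest unchanged
theorem hcapA_after (pos color : Int) (segs : List (String × Int)) :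
    ∀ (acc : List (String × Int)) (cur : Int), pos < cur →
      (segs.foldl (hcapStepA pos color) (acc, cur)).1 = acc ++ segs := by
  induction segs with
  | nil => intro acc cur _; simp
  | cons seg rest ih =>
    intro acc cur h
    have hn := hcapLen_nonneg seg.1
    have h1 : ¬ (cur + PySem.Str.len seg.1 ≤ pos) := by omega
    have h2 : cur > pos := h
    simp only [List.foldl_cons, hcapStepA, if_neg h1, if_pos h2]
    rw [ih (acc ++ [(seg.1, seg.2)]) cur h]
    simp

-- once current has passed pos, the locate scan copies the rest unchanged
theorem hcapGo_after (pos color : Int) (segs : List (String × Int)) :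
    ∀ (cur : Int), pos < cur → hcapGo pos color segs cur = segs := by
  induction segs with
  | nil => intro cur _; rfl
  | cons seg rest ih =>
    intro cur h
    have hn := hcapLen_nonneg seg.1
    obtain ⟨text, col⟩ := seg
    simp only at hn
    simp only [hcapGo, if_neg (show ¬(cur ≤ pos ∧ pos < cur + PySem.Str.len text) by omega)]
    rw [ih (cur + PySem.Str.len text) (by omega)]

-- A's three-way start/end/middle split equals the filtered three-slice list
theorem hcapGetNeg1 (s : List Char) (h : 0 < s.length) :
    PySem.List.pyGet? s (-1) = some (s[s.length - 1]'(by omega)) := by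
  simp only [PySem.List.pyGet?, PySem.List.pyIdx?]
  norm_num
  rw [if_pos (by omega)]
  simp [h]

theorem hcapPieces_eq (text : String) (col color off : Int)
    (h0 : 0 ≤ off) (h1 : off < PySem.Str.len text) :
    (if off = 0 then
      [(String.ofList [(PySem.Str.pyGet? text 0).getD ' '], color)] ++
        (if PySem.Str.len text > 1 then [(PySem.Str.slice text (some 1) none, col)] else [])
    else if off = PySem.Str.len text - 1 then
      (if PySem.Str.len text > 1 then [(PySem.Str.slice text none (some (-1)), col)] else []) ++
        [(String.ofList [(PySem.Str.pyGet? text (-1)).getD ' '], color)]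
    else
      [(PySem.Str.slice text none (some off), col),
       (String.ofList [(PySem.Str.pyGet? text off).getD ' '], color),
       (PySem.Str.slice text (some (off + 1)) none, col)])
    = [(PySem.Str.slice text none (some off), col),
       (String.ofList [(PySem.Str.pyGet? text off).getD ' '], color),
       (PySem.Str.slice text (some (off + 1)) none, col)].filter (fun p => p.1 ≠ "") := by
  have hlen : PySem.Str.len text = (text.toList.length : Int) := PySem.Str.len_eq text
  lift off to ℕ using h0 with k
  rw [hlen] at h1 ⊢
  have hk : k < text.toList.length := by exact_mod_cast h1
  have hL : text.toList.length = text.length := by simp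
  have hofi : ∀ l : List Char, (String.ofList l = "") ↔ l = [] := by
    intro l; rw [← String.toList_inj]; simp
  have hne : ∀ l : List Char, l ≠ [] → (String.ofList l ≠ "") := fun l h hc => h ((hofi l).mp hc)
  have e0 : PySem.Str.slice text none (some (k : Int)) = String.ofList (text.toList.take k) := by
    rw [← String.toList_inj]; simp [pysem]
  have e1 : PySem.Str.pyGet? text (k : Int) = some (text.toList[k]'hk) := by
    simp [pysem]
  have e2 : PySem.Str.slice text (some ((k : Int) + 1)) none = String.ofList (text.toList.drop (k + 1)) := by
    rw [← String.toList_inj]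
    simp only [pysem]
    rw [PySem.List.slice_from text.toList (by omega), show ((k : Int) + 1).toNat = k + 1 from by omega]
    simp
  have e00 : PySem.Str.pyGet? text 0 = some (text.toList[0]'(by omega)) := by
    simp [pysem]
  have edrop1 : PySem.Str.slice text (some 1) none = String.ofList (text.toList.drop 1) := by
    rw [← String.toList_inj, show (1 : Int) = ((1 : Nat) : Int) by rfl]
    simp [pysem]
  have etake : PySem.Str.slice text none (some (-1)) = String.ofList text.toList.dropLast := by
    rw [← String.toList_inj]; simp [pysem]
  have elast : PySem.Str.pyGet? text (-1) = some (text.toList[text.toList.length - 1]'(by omega)) := by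
    simp only [PySem.Str.pyGet?_eq, PySem.Chars.pyGet?_eq_listPyGet?]
    exact hcapGetNeg1 _ (by omega)
  simp only [e0, e1, e2, e00, edrop1, etake, elast, Option.getD_some]
  by_cases hk0 : k = 0
  · rw [if_pos (by omega : (k : Int) = 0)]
    subst hk0
    by_cases hl : 1 < text.toList.length
    · rw [if_pos (by omega : (text.toList.length : Int) > 1)]
      have f1 : String.ofList (List.take 0 text.toList) = "" := (hofi _).mpr (by simp)
      have f2 : String.ofList [text.toList[0]'hk] ≠ "" := hne _ (by simp)
      have f3 : String.ofList (List.drop (0 + 1) text.toList) ≠ "" := hne _ (by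
        intro h; rw [List.drop_eq_nil_iff] at h; omega)
      rw [List.filter_cons, List.filter_cons, List.filter_cons, List.filter_nil,
          if_neg (by simp), if_pos (decide_eq_true f2), if_pos (decide_eq_true f3)]
      simp
    · rw [if_neg (by omega : ¬ (text.toList.length : Int) > 1)]
      have f1 : String.ofList (List.take 0 text.toList) = "" := (hofi _).mpr (by simp)
      have f2 : String.ofList [text.toList[0]'hk] ≠ "" := hne _ (by simp)
      have f3 : String.ofList text.toList.tail = "" := (hofi _).mpr (by
        rw [← List.drop_one, List.drop_eq_nil_iff]; omega)
      rw [List.filter_cons, List.filter_cons, List.filter_cons, List.filter_nil,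
          if_neg (by simp), if_pos (decide_eq_true f2), if_neg (by simp [f3])]
      simp
  · rw [if_neg (by omega : ¬ (k : Int) = 0)]
    by_cases hk1 : k = text.toList.length - 1
    · rw [if_pos (by omega : (k : Int) = (text.toList.length : Int) - 1),
          if_pos (by omega : (text.toList.length : Int) > 1)]
      have htk : text.toList.dropLast = text.toList.take k := by
        rw [List.dropLast_eq_take, hk1]
      have hgi : text.toList[text.toList.length - 1]'(by omega) = text.toList[k]'hk := by
        simp [hk1]
      rw [htk, hgi]
      have f1 : String.ofList (List.take k text.toList) ≠ "" := hne _ (by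
        intro h
        rcases List.take_eq_nil_iff.mp h with h' | h'
        · exact hk0 h'
        · rw [h'] at hk; simp at hk)
      have f2 : String.ofList [text.toList[k]'hk] ≠ "" := hne _ (by simp)
      have f3 : String.ofList (List.drop (k + 1) text.toList) = "" := (hofi _).mpr (by
        rw [List.drop_eq_nil_iff]; omega)
      rw [List.filter_cons, List.filter_cons, List.filter_cons, List.filter_nil,
          if_pos (decide_eq_true f1), if_pos (decide_eq_true f2), if_neg (by simp [f3])]
      simp
    · rw [if_neg (by omega : ¬ (k : Int) = (text.toList.length : Int) - 1)]
      have f1 : String.ofList (List.take k text.toList) ≠ "" := hne _ (by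
        intro h
        rcases List.take_eq_nil_iff.mp h with h' | h'
        · exact hk0 h'
        · rw [h'] at hk; simp at hk)
      have f2 : String.ofList [text.toList[k]'hk] ≠ "" := hne _ (by simp)
      have f3 : String.ofList (List.drop (k + 1) text.toList) ≠ "" := hne _ (by
        intro h; rw [List.drop_eq_nil_iff] at h; omega)
      rw [List.filter_cons, List.filter_cons, List.filter_cons, List.filter_nil,
          if_pos (decide_eq_true f1), if_pos (decide_eq_true f2), if_pos (decide_eq_true f3)]

-- A's fold from (acc, cur) is acc ++ the locate scan from cur
theorem hcapMain (pos color : Int) (segs : List (String × Int)) :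
    ∀ (acc : List (String × Int)) (cur : Int),
      (segs.foldl (hcapStepA pos color) (acc, cur)).1 = acc ++ hcapGo pos color segs cur := by
  induction segs with
  | nil => intro acc cur; simp [hcapGo]
  | cons seg rest ih =>
    intro acc cur
    obtain ⟨text, scol⟩ := seg
    have hn := hcapLen_nonneg text
    by_cases h1 : cur + PySem.Str.len text ≤ pos
    · have hb : ¬ (cur ≤ pos ∧ pos < cur + PySem.Str.len text) := by omega
      simp only [List.foldl_cons, hcapStepA, if_pos h1, hcapGo, if_neg hb]
      rw [ih]
      simp
    · by_cases h2 : cur > pos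
      · have hb : ¬ (cur ≤ pos ∧ pos < cur + PySem.Str.len text) := by omega
        simp only [List.foldl_cons, hcapStepA, if_neg h1, if_pos h2, hcapGo, if_neg hb]
        rw [hcapA_after pos color rest _ cur h2,
            hcapGo_after pos color rest (cur + PySem.Str.len text) (by omega)]
        simp
      · have hb : cur ≤ pos ∧ pos < cur + PySem.Str.len text := by omega
        simp only [List.foldl_cons, hcapStepA, if_neg h1, if_neg h2, hcapGo, if_pos hb]
        have hp := hcapPieces_eq text scol color (pos - cur) (by omega) (by omega)
        by_cases c1 : pos - cur = 0
        · rw [if_pos c1, hcapA_after pos color rest _ (cur + PySem.Str.len text) (by omega),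
              ← hp, if_pos c1]
          simp only [List.append_assoc]
        · by_cases c2 : pos - cur = PySem.Str.len text - 1
          · rw [if_neg c1, if_pos c2, hcapA_after pos color rest _ (cur + PySem.Str.len text) (by omega),
                ← hp, if_neg c1, if_pos c2]
            simp only [List.append_assoc]
          · rw [if_neg c1, if_neg c2, hcapA_after pos color rest _ (cur + PySem.Str.len text) (by omega),
                ← hp, if_neg c1, if_neg c2]
            simp only [List.append_assoc]

-- ===== prefix-sum / bisect side =====

def hcapTotal (segs : List (String × Int)) : Int := (segs.map (fun s => PySem.Str.len s.1)).sum

def hcapEnds (cur : Int) (segs : List (String × Int)) : List Int :=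
  match segs with
  | [] => []
  | (t, _) :: rest => (cur + PySem.Str.len t) :: hcapEnds (cur + PySem.Str.len t) rest

theorem hcapTotal_nonneg (segs : List (String × Int)) : 0 ≤ hcapTotal segs := by
  unfold hcapTotal
  apply List.sum_nonneg
  intro x hx
  obtain ⟨s, _, rfl⟩ := List.mem_map.mp hx
  exact hcapLen_nonneg s.1

-- B's ends-building fold equals the recursive prefix sums
theorem hcapEnds_fold (segs : List (String × Int)) :
    ∀ (acc : List Int) (cur : Int),
      segs.foldl (fun (st : List Int × Int) seg =>
        (st.1 ++ [st.2 + PySem.Str.len seg.1], st.2 + PySem.Str.len seg.1)) (acc, cur)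
      = (acc ++ hcapEnds cur segs, cur + hcapTotal segs) := by
  induction segs with
  | nil => intro acc cur; simp [hcapEnds, hcapTotal]
  | cons seg rest ih =>
    intro acc cur
    obtain ⟨t, c⟩ := seg
    simp only [List.foldl_cons, ih, hcapEnds, hcapTotal, List.map_cons, List.sum_cons,
      Prod.mk.injEq]
    exact ⟨by simp, by ring⟩

theorem hcapEnds_length (cur : Int) (segs : List (String × Int)) :
    (hcapEnds cur segs).length = segs.length := by
  induction segs generalizing cur with
  | nil => rfl
  | cons seg rest ih => obtain ⟨t, c⟩ := seg; simp [hcapEnds, ih]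

theorem hcapEnds_getD (segs : List (String × Int)) :
    ∀ (cur : Int) (j : Nat), j < segs.length →
      (hcapEnds cur segs).getD j 0 = cur + hcapTotal (segs.take (j + 1)) := by
  induction segs with
  | nil => intro cur j h; simp at h
  | cons seg rest ih =>
    intro cur j h
    obtain ⟨t, c⟩ := seg
    cases j with
    | zero => simp [hcapEnds, hcapTotal]
    | succ k =>
      simp only [hcapEnds, List.getD_cons_succ, List.take_succ_cons]
      rw [ih (cur + PySem.Str.len t) k (by simpa using h)]
      simp only [hcapTotal, List.map_cons, List.sum_cons]
      ring

theorem hcapTotal_take_mono (segs : List (String × Int)) (m n : Nat) (h : m ≤ n) :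
    hcapTotal (segs.take m) ≤ hcapTotal (segs.take n) := by
  have hsplit : segs.take n = segs.take m ++ (segs.drop m).take (n - m) := by
    rw [← List.take_add]
    congr 1
    omega
  rw [hsplit]
  have : hcapTotal (segs.take m ++ (segs.drop m).take (n - m))
      = hcapTotal (segs.take m) + hcapTotal ((segs.drop m).take (n - m)) := by
    simp [hcapTotal]
  rw [this]
  have := hcapTotal_nonneg ((segs.drop m).take (n - m))
  omega

theorem hcapEnds_mono (cur : Int) (segs : List (String × Int)) (j k : Nat)
    (hjk : j ≤ k) (hk : k < segs.length) :
    (hcapEnds cur segs).getD j 0 ≤ (hcapEnds cur segs).getD k 0 := by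
  rw [hcapEnds_getD segs cur j (by omega), hcapEnds_getD segs cur k hk]
  have := hcapTotal_take_mono segs (j + 1) (k + 1) (by omega)
  omega

-- binary search characterization
theorem hcapBisect_spec (ends : List Int) (pos : Int)
    (mono : ∀ j k, j ≤ k → k < ends.length → ends.getD j 0 ≤ ends.getD k 0) :
    ∀ (n lo hi : Nat), hi - lo ≤ n → lo ≤ hi → hi ≤ ends.length →
      (∀ j, j < lo → ends.getD j 0 ≤ pos) →
      (∀ j, hi ≤ j → j < ends.length → pos < ends.getD j 0) →
      lo ≤ hcapBisect ends pos lo hi ∧ hcapBisect ends pos lo hi ≤ hi ∧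
      (∀ j, j < hcapBisect ends pos lo hi → ends.getD j 0 ≤ pos) ∧
      (∀ j, hcapBisect ends pos lo hi ≤ j → j < ends.length → pos < ends.getD j 0) := by
  intro n
  induction n with
  | zero =>
    intro lo hi hn hlohi hhile h1 h2
    have heq : lo = hi := by omega
    rw [hcapBisect, dif_neg (by omega : ¬ lo < hi)]
    exact ⟨le_refl _, by omega, h1, fun j hj hjl => h2 j (by omega) hjl⟩
  | succ m ih =>
    intro lo hi hn hlohi hhile h1 h2
    by_cases h : lo < hi
    · rw [hcapBisect, dif_pos h]
      have hmid1 : lo ≤ (lo + hi) / 2 := by omega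
      have hmid2 : (lo + hi) / 2 < hi := by omega
      by_cases hle : ends.getD ((lo + hi) / 2) 0 ≤ pos
      · rw [if_pos hle]
        have := ih ((lo + hi) / 2 + 1) hi (by omega) (by omega) hhile
          (fun j hj => le_trans (mono j ((lo + hi) / 2) (by omega) (by omega)) hle)
          h2
        exact ⟨by omega, this.2.1, this.2.2.1, this.2.2.2⟩
      · rw [if_neg hle]
        have hgt : pos < ends.getD ((lo + hi) / 2) 0 := lt_of_not_ge hle
        have := ih lo ((lo + hi) / 2) (by omega) (by omega) (by omega) h1
          (fun j hj hjl => lt_of_lt_of_le hgt (mono ((lo + hi) / 2) j hj hjl))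
        exact ⟨this.1, by omega, this.2.2.1, this.2.2.2⟩
    · rw [hcapBisect, dif_neg h]
      exact ⟨le_refl _, by omega, h1, fun j hj hjl => h2 j (by omega) hjl⟩

-- the locate scan equals take/pieces/drop at the located index
theorem hcapGo_splice (pos color : Int) :
    ∀ (segs : List (String × Int)) (cur : Int) (i : Nat),
      i < segs.length → cur ≤ pos →
      (∀ j, j < i → (hcapEnds cur segs).getD j 0 ≤ pos) →
      pos < (hcapEnds cur segs).getD i 0 →
      hcapGo pos color segs cur =
        segs.take i ++
        (let tc := segs.getD i ("", 0)
         let off := pos - ((hcapEnds cur segs).getD i 0 - PySem.Str.len tc.1)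
         [(PySem.Str.slice tc.1 none (some off), tc.2),
          (String.ofList [(PySem.Str.pyGet? tc.1 off).getD ' '], color),
          (PySem.Str.slice tc.1 (some (off + 1)) none, tc.2)].filter (fun p => p.1 ≠ "")) ++
        segs.drop (i + 1) := by
  intro segs
  induction segs with
  | nil => intro cur i h; simp at h
  | cons seg rest ih =>
    intro cur i hi hcur h1 h2
    obtain ⟨t, c⟩ := seg
    cases i with
    | zero =>
      simp only [hcapEnds, List.getD_cons_zero] at h2
      have hb : cur ≤ pos ∧ pos < cur + PySem.Str.len t := ⟨hcur, h2⟩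
      simp only [hcapGo, if_pos hb, List.take_zero, List.drop_succ_cons, List.drop_zero,
        List.getD_cons_zero, hcapEnds, List.nil_append]
      have : cur + PySem.Str.len t - PySem.Str.len t = cur := by ring
      rw [this]
    | succ k =>
      have h0 := h1 0 (Nat.succ_pos k)
      simp only [hcapEnds, List.getD_cons_zero] at h0
      have hb : ¬ (cur ≤ pos ∧ pos < cur + PySem.Str.len t) := by omega
      simp only [hcapGo, if_neg hb, List.take_succ_cons, List.drop_succ_cons,
        List.getD_cons_succ, hcapEnds, List.cons_append]
      rw [ih (cur + PySem.Str.len t) k (by simpa using hi) h0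
        (fun j hj => by have := h1 (j + 1) (by omega); simpa [hcapEnds] using this)
        (by simpa [hcapEnds] using h2)]

-- pos beyond the total: the locate scan copies everything unchanged
theorem hcapGo_beyond (pos color : Int) (segs : List (String × Int)) :
    ∀ (cur : Int), cur + hcapTotal segs ≤ pos → hcapGo pos color segs cur = segs := by
  induction segs with
  | nil => intro cur _; rfl
  | cons seg rest ih =>
    intro cur h
    obtain ⟨t, c⟩ := seg
    have hr := hcapTotal_nonneg rest
    have ht : hcapTotal ((t, c) :: rest) = PySem.Str.len t + hcapTotal rest := by
      simp [hcapTotal]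
    rw [ht] at h
    simp only [hcapGo, if_neg (show ¬(cur ≤ pos ∧ pos < cur + PySem.Str.len t) by omega)]
    rw [ih (cur + PySem.Str.len t) (by omega)]

-- ===== VERDICT (by name: the statement is the Claim_ definition above) =====
theorem highlight_character_at_position_py_spec : Claim_equal_highlight_character_at_position_py := by
  intro segments pos color _
  unfold Spec_highlight_character_at_position_py
  rw [hcapA_eq_fold, hcapMain pos color segments [] 0]
  simp only [List.nil_append]
  unfold highlight_character_at_position_py_alt
  rw [hcapEnds_fold segments [] 0]
  simp only [List.nil_append]
  by_cases hout : pos < 0 ∨ pos ≥ 0 + hcapTotal segments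
  · rw [if_pos hout]
    rcases hout with h | h
    · exact hcapGo_after pos color segments 0 (by omega)
    · exact hcapGo_beyond pos color segments 0 (by omega)
  · rw [if_neg hout]
    push_neg at hout
    obtain ⟨hpos0, hpostot⟩ := hout
    have hmono : ∀ j k, j ≤ k → k < (hcapEnds 0 segments).length →
        (hcapEnds 0 segments).getD j 0 ≤ (hcapEnds 0 segments).getD k 0 := by
      intro j k hjk hk
      exact hcapEnds_mono 0 segments j k hjk (by rwa [hcapEnds_length] at hk)
    have hspec := hcapBisect_spec (hcapEnds 0 segments) pos hmono
      (hcapEnds 0 segments).length 0 (hcapEnds 0 segments).length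
      (by omega) (Nat.zero_le _) (le_refl _)
      (fun j hj => absurd hj (Nat.not_lt_zero j))
      (fun j hj hjl => absurd (lt_of_le_of_lt hj hjl) (lt_irrefl _))
    obtain ⟨_, hle, h1, h2⟩ := hspec
    set r := hcapBisect (hcapEnds 0 segments) pos 0 (hcapEnds 0 segments).length with hr
    have hlen := hcapEnds_length 0 segments
    have hne : segments ≠ [] := by
      intro h; subst h; simp [hcapTotal] at hpostot; omega
    have hlen0 : 0 < segments.length := List.length_pos_iff.mpr hne
    have hrlt : r < segments.length := by
      by_contra hge
      push_neg at hge
      have hlast : (hcapEnds 0 segments).getD (segments.length - 1) 0 = 0 + hcapTotal segments := by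
        rw [hcapEnds_getD segments 0 (segments.length - 1) (by
          cases segments with | nil => exact absurd rfl hne | cons a l => simp)]
        congr 1
        rw [show segments.length - 1 + 1 = segments.length by
          cases segments with | nil => exact absurd rfl hne | cons a l => simp]
        rw [List.take_length]
      have := h1 (segments.length - 1) (by omega)
      omega
    rw [hcapGo_splice pos color segments 0 r hrlt hpos0
      (fun j hj => h1 j hj) (h2 r (le_refl r) (by omega))]
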